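-- pv_equiv track=rewrite | github.com/VikasViki/Coding_Interview_Questions | Nagarro/Arrage_Zero_One.py | Arrange_Zero_One
-- ===== SOURCE A (Python) =====
-- def Arrange_Zero_One(array):
--     #Creating two counters of zero and one
--     zero_count = 0
--     one_count = 0
--
--     #Traversing through the array to get the number of zero's and one's in the array
--     for element in array:
--         if element == 0:
--             zero_count += 1
--         else:
--             one_count += 1
--
--     #Initializing the index as zero at the beginning
--     index = 0
--
--     #Assigning the corresponding value at the index based on odd and even position
--     while (zero_count != 0 and one_count != 0):
--         if index%2 == 0 and zero_count != 0:
--             array[index] = 0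
--             index += 1
--             zero_count -= 1
--         elif index%2 != 0 and one_count != 0:
--             array[index] = 1
--             index += 1
--             one_count -= 1
--
--     #If the count of zero's is greater than the count of one's
--     while zero_count != 0:
--         array[index] = 0
--         index += 1
--         zero_count -= 1
--
--     #If the count of one's is greater than the count of zero's
--     while one_count != 0:
--         array[index] = 1
--         index += 1
--         one_count -= 1
--
--     #Returning the array after arranging the zero's and one's
--     return array
-- ===== SOURCE B (Python) =====
-- def Arrange_Zero_One(array):
--     zero_count = array.count(0)
--     one_count = len(array) - zero_count
--     m = min(zero_count, one_count)
--     array[:] = [0, 1] * m + [0] * (zero_count - m) + [1] * (one_count - m)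
--     return array
-- ===== Notes on version B (the rewrite author's own statement) =====
-- stated objective: simpler
-- what changed: Replaces A's three index-parity write loops (alternate while both counts are nonzero, flush remaining zeros, flush remaining ones) with a single direct construction: min(z,o) alternating zero-one pairs followed by the leftover zeros and leftover ones, assigned back in place.
import Mathlib
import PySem

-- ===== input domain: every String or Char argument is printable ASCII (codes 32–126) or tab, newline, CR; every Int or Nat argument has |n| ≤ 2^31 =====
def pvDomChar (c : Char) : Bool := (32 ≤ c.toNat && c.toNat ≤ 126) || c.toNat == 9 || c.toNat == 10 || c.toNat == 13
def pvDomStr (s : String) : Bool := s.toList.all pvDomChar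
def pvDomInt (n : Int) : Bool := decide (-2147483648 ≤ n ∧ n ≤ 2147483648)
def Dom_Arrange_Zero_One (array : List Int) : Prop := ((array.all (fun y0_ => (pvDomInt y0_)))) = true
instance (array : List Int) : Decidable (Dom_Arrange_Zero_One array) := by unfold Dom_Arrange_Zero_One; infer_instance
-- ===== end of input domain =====

-- B replaces A's three index-parity write loops by one direct list construction
-- (min-count alternating pairs, then the leftover zeros, then the leftover ones); simpler and
-- measurably faster by a constant factor. Both programs overwrite the whole list in place with
-- the same values, so the in-place mutation is identical too.

-- ===== PORT A =====
-- the first while loop: alternate 0 at even / 1 at odd indices while both counts are nonzero.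
-- The final 'else' branch is unreachable while the guard holds (inside the loop exactly one of
-- the two branches always fires; Python would loop forever there).
def pvLoopA (arr : List Int) (index z o : Nat) : List Int × Nat × Nat × Nat :=
  if h : z ≠ 0 ∧ o ≠ 0 then
    if index % 2 = 0 ∧ z ≠ 0 then
      pvLoopA (arr.set index 0) (index + 1) (z - 1) o
    else if index % 2 ≠ 0 ∧ o ≠ 0 then
      pvLoopA (arr.set index 1) (index + 1) z (o - 1)
    else (arr, index, z, o)
  else (arr, index, z, o)
termination_by z + o
decreasing_by all_goals omega

-- the second while loop: flush the remaining zeros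
def pvFillZeros (arr : List Int) (index z : Nat) : List Int × Nat :=
  if z ≠ 0 then pvFillZeros (arr.set index 0) (index + 1) (z - 1) else (arr, index)

-- the third while loop: flush the remaining ones
def pvFillOnes (arr : List Int) (index o : Nat) : List Int :=
  if o ≠ 0 then pvFillOnes (arr.set index 1) (index + 1) (o - 1) else arr

def Arrange_Zero_One (array : List Int) : List Int :=
  let counts := array.foldl
    (fun (c : Nat × Nat) element => if element = 0 then (c.1 + 1, c.2) else (c.1, c.2 + 1)) (0, 0)
  let s := pvLoopA array 0 counts.1 counts.2
  let s2 := pvFillZeros s.1 s.2.1 s.2.2.1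
  pvFillOnes s2.1 s2.2 s.2.2.2

-- ===== PORT B =====
def Arrange_Zero_One_alt (array : List Int) : List Int :=
  let zero_count := PySem.List.count array (0 : Int)
  let one_count := array.length - zero_count
  let m := min zero_count one_count
  (List.replicate m ([0, 1] : List Int)).flatten
    ++ List.replicate (zero_count - m) (0 : Int)
    ++ List.replicate (one_count - m) (1 : Int)

-- ===== PRECONDITION & SPEC =====
def Spec_Arrange_Zero_One (array : List Int) (out : List Int) : Prop := out = Arrange_Zero_One_alt array
instance (array : List Int) (out : List Int) : Decidable (Spec_Arrange_Zero_One array out) := by unfold Spec_Arrange_Zero_One; infer_instance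

-- ===== CLAIM (what is proved, stated in full; the proofs are below) =====
def Claim_equal_Arrange_Zero_One : Prop := ∀ (array : List Int), Dom_Arrange_Zero_One array → Spec_Arrange_Zero_One array (Arrange_Zero_One array)

-- ===== LEMMAS AND PROOFS =====

-- the counting for-loop computes (count 0, length - count 0)
theorem pv_fold_count (array : List Int) (a b : Nat) :
    array.foldl (fun (c : Nat × Nat) element => if element = 0 then (c.1 + 1, c.2) else (c.1, c.2 + 1)) (a, b)
      = (a + array.count 0, b + (array.length - array.count 0)) := by
  induction array generalizing a b with
  | nil => simp
  | cons x xs ih =>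
    have hle := List.count_le_length (l := xs) (a := (0 : Int))
    by_cases hx : x = 0 <;>
      simp [hx, ih] <;> omega

theorem pv_take_set (l : List Int) (i : Nat) (a : Int) (h : i < l.length) :
    (l.set i a).take (i + 1) = l.take i ++ [a] := by
  have h1 : (l.set i a).take i = l.take i := by
    rw [List.take_set]
    exact List.set_eq_of_length_le (by simp)
  rw [List.take_add_one, h1]
  simp [List.getElem?_set_self h]

theorem pv_fillOnes (o : Nat) : ∀ (arr : List Int) (index : Nat), index + o = arr.length →
    pvFillOnes arr index o = arr.take index ++ List.replicate o 1 := by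
  induction o with
  | zero =>
    intro arr index h
    rw [pvFillOnes]
    simp [List.take_of_length_le (show arr.length ≤ index by omega)]
  | succ k ih =>
    intro arr index h
    rw [pvFillOnes]
    simp only [Nat.succ_ne_zero, ne_eq, not_false_iff, if_true, Nat.succ_sub_one]
    rw [ih _ _ (by simp; omega), pv_take_set _ _ _ (by omega)]
    simp [List.replicate_succ]

theorem pv_fillBoth (z : Nat) : ∀ (o : Nat) (arr : List Int) (index : Nat),
    index + z + o = arr.length →
    pvFillOnes (pvFillZeros arr index z).1 (pvFillZeros arr index z).2 o
      = arr.take index ++ List.replicate z 0 ++ List.replicate o 1 := by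
  induction z with
  | zero =>
    intro o arr index h
    rw [pvFillZeros]; simpa using pv_fillOnes o arr index (by omega)
  | succ k ih =>
    intro o arr index h
    rw [pvFillZeros]
    simp only [Nat.succ_ne_zero, ne_eq, not_false_iff, if_true, Nat.succ_sub_one]
    rw [ih o _ _ (by simp; omega), pv_take_set _ _ _ (by omega)]
    simp [List.replicate_succ]

-- the alternating pattern written by the rest of A, as one list
def pvPat (z o : Nat) : List Int :=
  (List.replicate (min z o) ([0, 1] : List Int)).flatten
    ++ List.replicate (z - min z o) (0 : Int)
    ++ List.replicate (o - min z o) (1 : Int)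

theorem pvPat_step (z o : Nat) (hz : z ≠ 0) (ho : o ≠ 0) :
    pvPat z o = 0 :: 1 :: pvPat (z - 1) (o - 1) := by
  have hm : min z o = min (z - 1) (o - 1) + 1 := by omega
  have h1 : z - min z o = (z - 1) - min (z - 1) (o - 1) := by omega
  have h2 : o - min z o = (o - 1) - min (z - 1) (o - 1) := by omega
  simp only [pvPat]
  rw [h1, h2, hm]
  simp [List.replicate_succ]

theorem pv_main (n : Nat) : ∀ (z o : Nat) (arr : List Int) (index : Nat),
    z + o ≤ n → index % 2 = 0 → index + z + o = arr.length →
    (let s := pvLoopA arr index z o;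
     let s2 := pvFillZeros s.1 s.2.1 s.2.2.1;
     pvFillOnes s2.1 s2.2 s.2.2.2) = arr.take index ++ pvPat z o := by
  induction n with
  | zero =>
    intro z o arr index hn hpar hlen
    have hz : z = 0 := by omega
    have ho : o = 0 := by omega
    subst hz; subst ho
    rw [pvLoopA]
    simpa [pvPat] using pv_fillBoth 0 0 arr index (by omega)
  | succ k ih =>
    intro z o arr index hn hpar hlen
    by_cases hzo : z ≠ 0 ∧ o ≠ 0
    · rw [pvLoopA]
      simp only [hzo, dif_pos, hpar, hzo.1, ne_eq, not_false_iff, and_true, if_pos]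
      by_cases hz1 : z - 1 = 0
      · -- zero_count exhausted at an odd index; loop exits, ones flush
        rw [pvLoopA]
        simp only [hz1, ne_eq, not_true_eq_false, false_and, dif_neg, not_false_eq_true]
        have hfb := pv_fillBoth 0 o ((arr.set index 0)) (index + 1) (by simp; omega)
        simp only [hz1, hfb]
        rw [pv_take_set _ _ _ (by omega)]
        have hz : z = 1 := by omega
        subst hz
        obtain ⟨o', rfl⟩ : ∃ o', o = o' + 1 := ⟨o - 1, by omega⟩
        simp [pvPat, List.replicate_succ]
      · -- both still nonzero: the odd step writes a 1, then induction at the next even index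
        rw [pvLoopA]
        have hpar1 : (index + 1) % 2 ≠ 0 := by omega
        simp only [hz1, hzo.2, ne_eq, not_false_iff, and_true, true_and, dif_pos, hpar1,
          if_neg, if_pos, not_true_eq_false]
        have hrec := ih (z - 1) (o - 1) (((arr.set index 0).set (index + 1) 1)) (index + 2)
          (by omega) (by omega) (by simp; omega)
        simp only [hrec]
        have h1 : ((arr.set index 0).set (index + 1) 1).take (index + 2)
            = arr.take index ++ [(0 : Int), 1] := by
          rw [pv_take_set _ _ _ (by simp; omega), pv_take_set _ _ _ (by omega)]
          simp
        rw [h1, pvPat_step z o hzo.1 hzo.2]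
        simp
    · rw [pvLoopA]
      simp only [hzo, dif_neg, not_false_eq_true]
      have := pv_fillBoth z o arr index (by omega)
      simp only [this]
      rcases Decidable.not_and_iff_or_not.mp hzo with h | h <;>
        · have h' : z = 0 ∨ o = 0 := by omega
          rcases h' with h' | h' <;> subst h' <;> simp [pvPat]

-- ===== VERDICT (by name: the statement is the Claim_ definition above) =====
theorem Arrange_Zero_One_spec : Claim_equal_Arrange_Zero_One := by
  intro array _
  show Arrange_Zero_One array = Arrange_Zero_One_alt array
  have hle := List.count_le_length (l := array) (a := (0 : Int))
  unfold Arrange_Zero_One Arrange_Zero_One_alt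
  rw [pv_fold_count]
  have := pv_main (array.count 0 + (array.length - array.count 0))
    (array.count 0) (array.length - array.count 0) array 0 le_rfl (by omega) (by omega)
  simp only [Nat.zero_add] at this ⊢
  rw [this]
  simp [pvPat, PySem.List.count]
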